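-- pv_equiv track=rewrite | github.com/keegan8912/tweet_prediction | remove_extra_lines.py | remove_extra_lines
-- ===== SOURCE A (Python) =====
-- def remove_extra_lines(text):
--     list_of_suffix = [".", ",", "!", "?"]
--     idx = []
--     for suffix in list_of_suffix:
--         idx.append(text.rfind(suffix))
--
--     for suffix in list_of_suffix:
--         if text.endswith(suffix, 0, len(text)):
--             #save index, take the largest index here
--             return text
--         # elif text.rfind(suffix) != -1:
--         else:
--             return text[0:max(idx)+1]
-- ===== SOURCE B (Python) =====
-- def remove_extra_lines(text):
--     punct = {'.', ',', '!', '?'}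
--     for i in range(len(text) - 1, -1, -1):
--         if text[i] in punct:
--             return text[:i + 1]
--     return ""
-- ===== Notes on version B (the rewrite author's own statement) =====
-- stated objective: simpler
-- what changed: Replaces four full rfind scans plus a max over the collected indices (and a redundant endswith branch) with a single early-stopping backward scan that returns the prefix at the first sentence-punctuation character found.
import Mathlib
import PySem

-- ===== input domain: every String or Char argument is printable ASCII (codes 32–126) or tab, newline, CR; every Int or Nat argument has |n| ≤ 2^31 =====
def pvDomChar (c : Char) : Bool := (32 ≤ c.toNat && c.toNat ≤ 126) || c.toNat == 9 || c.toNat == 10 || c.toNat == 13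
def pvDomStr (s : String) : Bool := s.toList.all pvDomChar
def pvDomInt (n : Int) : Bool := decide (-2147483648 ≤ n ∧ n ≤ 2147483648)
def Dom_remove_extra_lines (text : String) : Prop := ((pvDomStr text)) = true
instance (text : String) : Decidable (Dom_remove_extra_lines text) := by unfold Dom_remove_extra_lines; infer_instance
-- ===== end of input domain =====

-- B replaces A's four rfind scans + max (and redundant endswith check) with one early-stopping
-- backward scan; equivalence of the return values is proved on all of Dom (A is total).

-- ===== PORT A =====
-- second loop of A: first iteration always returns (endswith branch or the else branch)
def remove_extra_lines_loop2 (text : String) (idx : List Int) : List String → String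
  | [] => ""          -- unreachable: list_of_suffix is a nonempty literal (Python would fall off, returning None)
  | suffix :: _ =>
      -- text.endswith(suffix, 0, len(text)) with full bounds is plain endswith
      if PySem.Str.endswith text suffix then text
      else
        match PySem.List.max? idx (fun x => x) with   -- max(idx); idx always has 4 elements
        | some m => PySem.Str.slice text (some 0) (some (m + 1))   -- text[0:max(idx)+1]
        | none => ""    -- unreachable

def remove_extra_lines (text : String) : String :=
  let list_of_suffix : List String := [".", ",", "!", "?"]
  let idx : List Int :=
    list_of_suffix.foldl (fun acc suffix => acc ++ [PySem.Str.rfind text suffix]) []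
  remove_extra_lines_loop2 text idx list_of_suffix

-- ===== PORT B =====
-- backward scan: i runs k-1, k-2, …, 0; first punctuation hit returns text[:i+1]
def remove_extra_lines_alt_go (cs : List Char) : Nat → String
  | 0 => ""
  | k + 1 =>
      if cs.getD k ' ' ∈ ['.', ',', '!', '?'] then String.ofList (cs.take (k + 1))
      else remove_extra_lines_alt_go cs k

def remove_extra_lines_alt (text : String) : String :=
  remove_extra_lines_alt_go text.toList text.toList.length

-- ===== PRECONDITION & SPEC =====
def Spec_remove_extra_lines (text : String) (out : String) : Prop := out = remove_extra_lines_alt text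
instance (text : String) (out : String) : Decidable (Spec_remove_extra_lines text out) := by unfold Spec_remove_extra_lines; infer_instance

-- ===== CLAIM (what is proved, stated in full; the proofs are below) =====
def Claim_equal_remove_extra_lines : Prop := ∀ (text : String), Dom_remove_extra_lines text → Spec_remove_extra_lines text (remove_extra_lines text)


-- ===== LEMMAS AND PROOFS =====

-- max of the four rfind.go values at level k (A's max(idx), with rfind unfolded to its scan)
def pvM (cs : List Char) (k : Nat) : Int :=
  max (max (max (PySem.Chars.rfind.go cs ['.'] k) (PySem.Chars.rfind.go cs [','] k))
      (PySem.Chars.rfind.go cs ['!'] k)) (PySem.Chars.rfind.go cs ['?'] k)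

theorem pv_prefix_iff (c : Char) (l : List Char) :
    [c].isPrefixOf l = true ↔ l.head? = some c := by
  cases l with
  | nil => simp [List.isPrefixOf]
  | cons a t =>
    show (c == a && true) = true ↔ _
    simp only [Bool.and_true, beq_iff_eq, List.head?_cons, Option.some.injEq]
    exact eq_comm

theorem pv_go_zero (cs : List Char) (c : Char) :
    PySem.Chars.rfind.go cs [c] 0 = if cs[0]? = some c then 0 else -1 := by
  rw [PySem.Chars.rfind.go]
  by_cases h : cs[0]? = some c
  · rw [if_pos ((pv_prefix_iff c cs).2 (List.head?_eq_getElem? ▸ h)), if_pos h]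
  · rw [if_neg (fun hp => h (List.head?_eq_getElem? ▸ (pv_prefix_iff c cs).1 hp)), if_neg h]

theorem pv_go_succ (cs : List Char) (c : Char) (j : Nat) :
    PySem.Chars.rfind.go cs [c] (j + 1)
      = if cs[j + 1]? = some c then ((j : Int) + 1) else PySem.Chars.rfind.go cs [c] j := by
  rw [PySem.Chars.rfind.go]
  have hh : (cs.drop (j + 1)).head? = cs[j + 1]? := List.head?_drop
  by_cases h : cs[j + 1]? = some c
  · rw [if_pos ((pv_prefix_iff c _).2 (hh ▸ h)), if_pos h]
    push_cast; ring
  · rw [if_neg (fun hp => h (hh ▸ (pv_prefix_iff c _).1 hp)), if_neg h]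

theorem pv_go_le (cs : List Char) (c : Char) (k : Nat) :
    PySem.Chars.rfind.go cs [c] k ≤ (k : Int) := by
  induction k with
  | zero => rw [pv_go_zero]; split <;> omega
  | succ j ih => rw [pv_go_succ]; split <;> [omega; (push_cast; push_cast at ih; omega)]

theorem pv_go_ge (cs : List Char) (c : Char) (k : Nat) :
    -1 ≤ PySem.Chars.rfind.go cs [c] k := by
  induction k with
  | zero => rw [pv_go_zero]; split <;> omega
  | succ j ih => rw [pv_go_succ]; split <;> [(push_cast; omega); exact ih]

theorem pv_go_hit (cs : List Char) (c : Char) (k : Nat) (h : cs[k]? = some c) :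
    PySem.Chars.rfind.go cs [c] k = (k : Int) := by
  cases k with
  | zero => rw [pv_go_zero, if_pos h]; rfl
  | succ j => rw [pv_go_succ, if_pos h]; push_cast; ring

theorem pv_getD_eq (cs : List Char) (k : Nat) :
    cs.getD k ' ' = (cs[k]?).getD ' ' := List.getD_eq_getElem?_getD

-- core invariant: B's backward scan at fuel k+1 equals A's take of (max of the four scans at level k) + 1
theorem pv_main (cs : List Char) (k : Nat) (hk : k < cs.length) :
    remove_extra_lines_alt_go cs (k + 1) = String.ofList (cs.take ((pvM cs k + 1).toNat)) := by
  induction k with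
  | zero =>
    rw [remove_extra_lines_alt_go]
    have hsome : cs[0]? = some (cs.getD 0 ' ') := by
      rw [pv_getD_eq, List.getElem?_eq_getElem hk]; rfl
    have hub1 := pv_go_le cs '.' 0
    have hub2 := pv_go_le cs ',' 0
    have hub3 := pv_go_le cs '!' 0
    have hub4 := pv_go_le cs '?' 0
    by_cases h : cs.getD 0 ' ' ∈ ['.', ',', '!', '?']
    · rw [if_pos h]
      have hM : pvM cs 0 = 0 := by
        refine le_antisymm (max_le (max_le (max_le hub1 hub2) hub3) hub4) ?_
        simp only [List.mem_cons, List.not_mem_nil, or_false] at h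
        rcases h with h | h | h | h
        · exact le_trans (le_of_eq (pv_go_hit cs '.' 0 (by rw [hsome, h])).symm)
            (le_max_of_le_left (le_max_of_le_left (le_max_left _ _)))
        · exact le_trans (le_of_eq (pv_go_hit cs ',' 0 (by rw [hsome, h])).symm)
            (le_max_of_le_left (le_max_of_le_left (le_max_right _ _)))
        · exact le_trans (le_of_eq (pv_go_hit cs '!' 0 (by rw [hsome, h])).symm)
            (le_max_of_le_left (le_max_right _ _))
        · exact le_trans (le_of_eq (pv_go_hit cs '?' 0 (by rw [hsome, h])).symm)
            (le_max_right _ _)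
      rw [hM, show ((0 : Int) + 1).toNat = 0 + 1 from by norm_num]
    · rw [if_neg h]
      have hM : pvM cs 0 = -1 := by
        have hne : ∀ c ∈ ['.', ',', '!', '?'], ¬ cs[0]? = some c := by
          intro c hc hcontra
          rw [hsome] at hcontra
          exact h (by rw [Option.some.injEq] at hcontra; rw [hcontra]; exact hc)
        unfold pvM
        rw [pv_go_zero, pv_go_zero, pv_go_zero, pv_go_zero,
            if_neg (hne '.' (by simp)), if_neg (hne ',' (by simp)),
            if_neg (hne '!' (by simp)), if_neg (hne '?' (by simp))]
        rfl
      rw [hM]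
      rfl
  | succ j ih =>
    have hj : j < cs.length := Nat.lt_of_succ_lt hk
    rw [remove_extra_lines_alt_go]
    have hsome : cs[j + 1]? = some (cs.getD (j + 1) ' ') := by
      rw [pv_getD_eq, List.getElem?_eq_getElem hk]; rfl
    by_cases h : cs.getD (j + 1) ' ' ∈ ['.', ',', '!', '?']
    · rw [if_pos h]
      have hub1 := pv_go_le cs '.' (j + 1)
      have hub2 := pv_go_le cs ',' (j + 1)
      have hub3 := pv_go_le cs '!' (j + 1)
      have hub4 := pv_go_le cs '?' (j + 1)
      have hM : pvM cs (j + 1) = ((j + 1 : Nat) : Int) := by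
        refine le_antisymm (max_le (max_le (max_le hub1 hub2) hub3) hub4) ?_
        simp only [List.mem_cons, List.not_mem_nil, or_false] at h
        rcases h with h | h | h | h
        · exact le_trans (le_of_eq (pv_go_hit cs '.' (j + 1) (by rw [hsome, h])).symm)
            (le_max_of_le_left (le_max_of_le_left (le_max_left _ _)))
        · exact le_trans (le_of_eq (pv_go_hit cs ',' (j + 1) (by rw [hsome, h])).symm)
            (le_max_of_le_left (le_max_of_le_left (le_max_right _ _)))
        · exact le_trans (le_of_eq (pv_go_hit cs '!' (j + 1) (by rw [hsome, h])).symm)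
            (le_max_of_le_left (le_max_right _ _))
        · exact le_trans (le_of_eq (pv_go_hit cs '?' (j + 1) (by rw [hsome, h])).symm)
            (le_max_right _ _)
      rw [hM, show (((j + 1 : Nat) : Int) + 1).toNat = j + 1 + 1 from by omega]
    · rw [if_neg h]
      have hne : ∀ c ∈ ['.', ',', '!', '?'], ¬ cs[j + 1]? = some c := by
        intro c hc hcontra
        rw [hsome] at hcontra
        exact h (by rw [Option.some.injEq] at hcontra; rw [hcontra]; exact hc)
      have hM : pvM cs (j + 1) = pvM cs j := by
        unfold pvM
        rw [pv_go_succ, pv_go_succ, pv_go_succ, pv_go_succ,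
            if_neg (hne '.' (by simp)), if_neg (hne ',' (by simp)),
            if_neg (hne '!' (by simp)), if_neg (hne '?' (by simp))]
      rw [hM, ih hj]

-- A's rfind at the top level (length = m+1) steps down to level m (position m+1 is past the end)
theorem pv_rfind_eq_go (cs : List Char) (c : Char) (m : Nat) (h : cs.length = m + 1) :
    PySem.Chars.rfind cs [c] = PySem.Chars.rfind.go cs [c] m := by
  unfold PySem.Chars.rfind
  rw [h, pv_go_succ, if_neg]
  rw [List.getElem?_eq_none (by omega)]
  simp

theorem pv_equiv (text : String) :
    remove_extra_lines text = remove_extra_lines_alt text := by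
  unfold remove_extra_lines remove_extra_lines_alt
  cases hcs : text.toList with
  | nil =>
    rw [remove_extra_lines_loop2]
    have hend : PySem.Str.endswith text "." = false := by
      rw [PySem.Str.endswith, hcs]
      rfl
    rw [hend]
    simp only [Bool.false_eq_true, if_false, List.foldl, List.nil_append]
    rw [PySem.Str.rfind_eq, PySem.Str.rfind_eq, PySem.Str.rfind_eq, PySem.Str.rfind_eq, hcs]
    have hrf : ∀ c : Char, PySem.Chars.rfind ([] : List Char) [c] = -1 := fun c => rfl
    rw [show (".".toList) = ['.'] from rfl, show (",".toList) = [','] from rfl,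
        show ("!".toList) = ['!'] from rfl, show ("?".toList) = ['?'] from rfl,
        hrf, hrf, hrf, hrf]
    simp only [List.cons_append, List.nil_append]
    rw [show PySem.List.max? [(-1 : Int), -1, -1, -1] (fun x => x) = some (-1) from by decide]
    show PySem.Str.slice text (some 0) (some (-1 + 1)) = remove_extra_lines_alt_go [] [].length
    rw [PySem.Str.slice, PySem.Chars.slice, hcs]
    decide
  | cons a t =>
    rw [remove_extra_lines_loop2]
    simp only [List.foldl, List.nil_append, List.cons_append]
    rw [PySem.Str.rfind_eq, PySem.Str.rfind_eq, PySem.Str.rfind_eq, PySem.Str.rfind_eq, hcs]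
    rw [show (".".toList) = ['.'] from rfl, show (",".toList) = [','] from rfl,
        show ("!".toList) = ['!'] from rfl, show ("?".toList) = ['?'] from rfl]
    set m := t.length with hm
    have hlen : (a :: t).length = m + 1 := by simp [hm]
    rw [pv_rfind_eq_go (a :: t) '.' m hlen, pv_rfind_eq_go (a :: t) ',' m hlen,
        pv_rfind_eq_go (a :: t) '!' m hlen, pv_rfind_eq_go (a :: t) '?' m hlen]
    have hmax : PySem.List.max?
        [PySem.Chars.rfind.go (a :: t) ['.'] m, PySem.Chars.rfind.go (a :: t) [','] m,
         PySem.Chars.rfind.go (a :: t) ['!'] m, PySem.Chars.rfind.go (a :: t) ['?'] m]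
        (fun x => x) = some (pvM (a :: t) m) := by
      rw [PySem.List.max?_id_cons]
      rfl
    have hmain := pv_main (a :: t) m (by omega)
    by_cases hend : PySem.Str.endswith text "." = true
    · rw [if_pos hend]
      -- text ends with '.', so B's scan hits at once and returns all of text
      have hlast : (a :: t)[m]? = some '.' := by
        have hs : ['.'].isSuffixOf (a :: t) = true := by
          have := hend
          rw [PySem.Str.endswith, hcs] at this
          exact this
        rw [List.isSuffixOf, show (['.'].reverse) = ['.'] from rfl, pv_prefix_iff,
            List.head?_reverse, List.getLast?_eq_getElem?] at hs
        rw [hlen] at hs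
        simpa using hs
      have hgetm : (a :: t).getD m ' ' = '.' := by
        rw [pv_getD_eq, hlast]
        rfl
      rw [hlen, remove_extra_lines_alt_go, if_pos (by rw [hgetm]; simp)]
      rw [List.take_of_length_le (by omega)]
      rw [← hcs]
      exact String.ofList_toList.symm
    · rw [if_neg hend, hmax, hlen, hmain]
      show String.ofList (PySem.Chars.slice text.toList (some 0) (some (pvM (a :: t) m + 1))) = _
      rw [PySem.Chars.slice, hcs]
      congr 1
      have hge : -1 ≤ pvM (a :: t) m := by
        have h1 := pv_go_ge (a :: t) '.' m
        exact le_trans h1 (le_max_of_le_left (le_max_of_le_left (le_max_left _ _)))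
      simp only [PySem.List.slice_zero_start]
      rw [PySem.List.slice_to _ (by omega)]

-- ===== VERDICT (by name: the statement is the Claim_ definition above) =====
theorem remove_extra_lines_spec : Claim_equal_remove_extra_lines := by
  intro text _
  unfold Spec_remove_extra_lines
  exact pv_equiv text
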